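-- pv_equiv track=rewrite | github.com/chamorion/BW-alignment | SuffixArray.py | gen_t
-- ===== SOURCE A (Python) =====
-- def gen_t(s):
--     t = [''] * len(s)
--     t[-1] = 'S'
--     i = len(s) - 2
--     while i >= 0:
--         if s[i] < s[i + 1]:
--             t[i] = 'S'
--         elif s[i] > s[i + 1]:
--             t[i] = 'L'
--         else:
--             t[i] = t[i + 1]
--         i -= 1
--     return t
-- ===== SOURCE B (Python) =====
-- def gen_t(s):
--     res = []
--     i = 0
--     n = len(s)
--     while i < n:
--         j = i + 1
--         while j < n and s[j] == s[i]:
--             j += 1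
--         typ = 'S' if j == n or s[i] < s[j] else 'L'
--         res.extend([typ] * (j - i))
--         i = j
--     return res
-- ===== Notes on version B (the rewrite author's own statement) =====
-- stated objective: alternative
-- what changed: Replaces the backward per-element tie-propagation over a preallocated array with a forward run-grouping pass that assigns each maximal run of equal characters its type from the first differing character (end of string counts as 'S').
import Mathlib
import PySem

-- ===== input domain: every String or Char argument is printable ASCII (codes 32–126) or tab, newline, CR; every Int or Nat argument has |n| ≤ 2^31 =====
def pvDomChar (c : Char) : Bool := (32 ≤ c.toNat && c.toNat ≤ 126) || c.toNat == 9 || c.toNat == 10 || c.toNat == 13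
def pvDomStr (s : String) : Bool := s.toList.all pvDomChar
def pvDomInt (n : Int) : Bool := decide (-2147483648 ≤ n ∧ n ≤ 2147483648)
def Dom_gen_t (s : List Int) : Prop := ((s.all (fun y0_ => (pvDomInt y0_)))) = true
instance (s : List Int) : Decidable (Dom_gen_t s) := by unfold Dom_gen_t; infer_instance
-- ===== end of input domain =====

-- B walks the string forward, grouping maximal runs of equal values and assigning each
-- run its type from the first differing value; A propagates types backward per element.

-- ===== PORT A =====
-- backward while-loop of A: fuel = i+1, i.e. fuel k+1 handles index i = k, then recurses.
-- All indices accessed are in range on every reachable call, so getD is exact here.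
def genTLoopA (s : List Int) (t : List String) : Nat → List String
  | 0 => t
  | k + 1 =>
      let a := s.getD k 0
      let b := s.getD (k + 1) 0
      let v := if a < b then "S" else if a > b then "L" else t.getD (k + 1) ""
      genTLoopA s (t.set k v) k

def gen_t (s : List Int) : List String :=
  let n := s.length
  let t := (List.replicate n "").set (n - 1) "S"
  genTLoopA s t (n - 1)

-- ===== PORT B =====
-- forward run-grouping pass of Source B: the inner while-scan of the run is takeWhile/dropWhile.
def gen_t_alt (s : List Int) : List String :=
  match s with
  | [] => []
  | c :: rest =>
      let run := rest.takeWhile (· == c)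
      let rem := rest.dropWhile (· == c)
      let typ := match rem with
        | [] => "S"
        | d :: _ => if c < d then "S" else "L"
      List.replicate (1 + run.length) typ ++ gen_t_alt rem
termination_by s.length
decreasing_by
  have := List.length_dropWhile_le (· == c) rest
  simp; omega

-- ===== PRECONDITION & SPEC =====
-- Pre_ excludes only the empty list, on which A raises IndexError (t[-1] on an empty list).
def Pre_gen_t (s : List Int) : Prop := s ≠ []
instance (s : List Int) : Decidable (Pre_gen_t s) := by unfold Pre_gen_t; infer_instance
def pvWitness_gen_t : List Int := [2, 1, 1, 3]

def Spec_gen_t (s : List Int) (out : List String) : Prop := out = gen_t_alt s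
instance (s : List Int) (out : List String) : Decidable (Spec_gen_t s out) := by unfold Spec_gen_t; infer_instance

-- ===== CLAIM (what is proved, stated in full; the proofs are below) =====
def Claim_equal_gen_t : Prop := ∀ (s : List Int), Dom_gen_t s → Pre_gen_t s → Spec_gen_t s (gen_t s)

-- ===== LEMMAS AND PROOFS =====

-- reference recursion: the type of position i as a function of the suffix after it
def typf (a : Int) : List Int → String
  | [] => "S"
  | b :: r => if a < b then "S" else if a > b then "L" else typf b r

def refT : List Int → List String
  | [] => []
  | a :: r => typf a r :: refT r

-- the type computed from the first differing value after the run
def typD (c : Int) (rest : List Int) : String :=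
  match rest.dropWhile (· == c) with
  | [] => "S"
  | d :: _ => if c < d then "S" else "L"

lemma refT_length (s : List Int) : (refT s).length = s.length := by
  induction s with
  | nil => rfl
  | cons a r ih => simp [refT, ih]

lemma typf_eq_typD (rest : List Int) : ∀ c, typf c rest = typD c rest := by
  induction rest with
  | nil => intro c; rfl
  | cons b r ih =>
    intro c
    by_cases h : b = c
    · subst h
      simp [typf, typD, List.dropWhile]
      simpa [typD] using ih b
    · have hne : (b == c) = false := by simp [h]
      rcases lt_trichotomy c b with hlt | heq | hgt
      · simp [typf, typD, List.dropWhile, hne, hlt]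
      · exact absurd heq.symm h
      · simp [typf, typD, List.dropWhile, hne, not_lt_of_gt hgt, hgt]

lemma run_refT (rest : List Int) : ∀ c,
    List.replicate ((rest.takeWhile (· == c)).length) (typD c rest)
      ++ refT (rest.dropWhile (· == c)) = refT rest := by
  induction rest with
  | nil => intro c; rfl
  | cons b r ih =>
    intro c
    by_cases h : b = c
    · subst h
      simp only [List.takeWhile, List.dropWhile, beq_self_eq_true, List.length_cons,
        List.replicate_succ, List.cons_append]
      have hd : typD b (b :: r) = typD b r := by
        simp [typD, List.dropWhile]
      rw [hd, ih b, refT]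
      rw [typf_eq_typD]
    · have hne : (b == c) = false := by simp [h]
      simp [List.takeWhile, List.dropWhile, hne]

lemma alt_eq_refT : ∀ s : List Int, gen_t_alt s = refT s
  | [] => by rw [gen_t_alt]; rfl
  | c :: rest => by
    have ih := alt_eq_refT (rest.dropWhile (· == c))
    rw [gen_t_alt, ih]
    show List.replicate (1 + (rest.takeWhile (· == c)).length) (typD c rest)
        ++ refT (rest.dropWhile (· == c)) = refT (c :: rest)
    rw [Nat.add_comm, List.replicate_succ, List.cons_append, run_refT rest c, refT,
      typf_eq_typD]
termination_by s => s.length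
decreasing_by
  have := List.length_dropWhile_le (· == c) rest
  simp; omega

lemma refT_get (s : List Int) : ∀ k, k < s.length →
    (refT s)[k]? = some (typf (s.getD k 0) (s.drop (k + 1))) := by
  induction s with
  | nil => intro k hk; simp at hk
  | cons a r ih =>
    intro k hk
    cases k with
    | zero => simp [refT]
    | succ k =>
      simp only [refT, List.getElem?_cons_succ, List.getD_cons_succ, List.drop_succ_cons]
      exact ih k (by simpa using hk)

lemma loopA_eq (s : List Int) : ∀ (fuel : Nat) (t : List String),
    t.length = s.length → fuel < s.length →
    (∀ j, fuel ≤ j → j < s.length → t[j]? = (refT s)[j]?) →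
    genTLoopA s t fuel = refT s := by
  intro fuel
  induction fuel with
  | zero =>
    intro t hlen _ hinv
    rw [genTLoopA]
    apply List.ext_getElem?
    intro j
    by_cases hj : j < s.length
    · exact hinv j (Nat.zero_le j) hj
    · rw [List.getElem?_eq_none (by omega), List.getElem?_eq_none (by rw [refT_length]; omega)]
  | succ k ih =>
    intro t hlen hfuel hinv
    rw [genTLoopA]
    have hk1 : k + 1 < s.length := hfuel
    have hk : k < s.length := by omega
    apply ih
    · simp [hlen]
    · omega
    · intro j hj1 hj2
      by_cases hj : j = k
      · subst hj
        rw [List.getElem?_set_self (by omega)]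
        rw [refT_get s j hj2]
        have hdrop : s.drop (j + 1) = s.getD (j + 1) 0 :: s.drop (j + 2) := by
          rw [List.drop_eq_getElem_cons hk1]
          simp [List.getD, hk1]
        have ht1 : t.getD (j + 1) "" = typf (s.getD (j + 1) 0) (s.drop (j + 2)) := by
          have := hinv (j + 1) (by omega) hk1
          rw [refT_get s (j + 1) hk1] at this
          simp [List.getD, this]
        rw [hdrop, typf, ht1]
      · rw [List.getElem?_set_ne (by omega)]
        exact hinv j (by omega) hj2

lemma gen_t_eq_refT (s : List Int) (hs : s ≠ []) : gen_t s = refT s := by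
  have hn : 0 < s.length := List.length_pos_iff.mpr hs
  unfold gen_t
  apply loopA_eq
  · simp
  · omega
  · intro j hj1 hj2
    have hj : j = s.length - 1 := by omega
    subst hj
    rw [List.getElem?_set_self (by simp; omega)]
    rw [refT_get s _ (by omega)]
    have : s.drop (s.length - 1 + 1) = [] := by
      apply List.drop_eq_nil_of_le; omega
    rw [this, typf]

-- ===== VERDICT (by name: the statement is the Claim_ definition above) =====
theorem gen_t_spec : Claim_equal_gen_t := by
  intro s _ hpre
  unfold Spec_gen_t
  rw [gen_t_eq_refT s hpre, alt_eq_refT]
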